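-- pv_equiv track=rewrite | github.com/D9veth/projects | enocde and decode shifr_Vigenera.py | samokluch_shifru
-- ===== SOURCE A (Python) =====
-- alphabet=['A', 'B', 'C', 'D', 'E', 'F', 'G', 'H', 'I', 'J', 'K', 'L', 'M', 'N', 'O', 'P', 'Q', 'R', 'S', 'T', 'U', 'V', 'W', 'X', 'Y', 'Z']
--
-- def samokluch_shifru(shifr, kluch):  #шифрование с помощью самоключа по шифртексту
--     gamma=kluch[0]#Гамма получает первый символ ключа
--     for i in range(0, len(shifr)-1):#гамма строится постепенно получая символы уже зашифрованного текста
--         j = i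
--         gamma+= alphabet[(alphabet.index(shifr[i]) + alphabet.index(gamma[j])) % 26]
--     otvet = ''
--     for i in range(0, len(shifr)):#С помощью цикла for шифрую каждый символ исходного текста
--         j = i
--         otvet += alphabet[(alphabet.index(shifr[i]) + alphabet.index(gamma[j])) % 26]
--     return (otvet)
-- ===== SOURCE B (Python) =====
-- alphabet=['A', 'B', 'C', 'D', 'E', 'F', 'G', 'H', 'I', 'J', 'K', 'L', 'M', 'N', 'O', 'P', 'Q', 'R', 'S', 'T', 'U', 'V', 'W', 'X', 'Y', 'Z']
--
-- def samokluch_shifru(shifr, kluch):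
--     # single pass: each output char is the next gamma char, so carry it as `prev`
--     prev = kluch[0]
--     out = []
--     for c in shifr:
--         prev = alphabet[(alphabet.index(c) + alphabet.index(prev)) % 26]
--         out.append(prev)
--     return ''.join(out)
-- ===== Notes on version B (the rewrite author's own statement) =====
-- stated objective: simpler
-- what changed: A first builds a separate gamma string with one index loop and then a second index loop encrypting against it; B observes that each output character is exactly the next gamma character, so it does a single pass over shifr carrying the previous cipher character, never materializing gamma.
import Mathlib
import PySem

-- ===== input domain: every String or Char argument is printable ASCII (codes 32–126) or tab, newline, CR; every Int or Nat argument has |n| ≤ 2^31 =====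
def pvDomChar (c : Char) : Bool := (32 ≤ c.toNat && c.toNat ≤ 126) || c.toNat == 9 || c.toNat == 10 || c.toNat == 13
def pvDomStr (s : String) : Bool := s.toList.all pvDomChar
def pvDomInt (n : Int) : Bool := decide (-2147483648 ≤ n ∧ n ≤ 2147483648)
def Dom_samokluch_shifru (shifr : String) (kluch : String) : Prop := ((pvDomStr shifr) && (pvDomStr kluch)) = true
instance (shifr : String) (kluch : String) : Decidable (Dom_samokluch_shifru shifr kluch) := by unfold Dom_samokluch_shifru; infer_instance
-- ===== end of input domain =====

-- B fuses A's two index loops into one pass carrying the previous cipher character (objective: simpler).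

-- ===== PORT A =====
def pvAlph : List Char :=
  ['A','B','C','D','E','F','G','H','I','J','K','L','M',
   'N','O','P','Q','R','S','T','U','V','W','X','Y','Z']

-- alphabet.index(c); Pre_ excludes the ValueError case (c not in alphabet), so the default is never taken
def pvIdx (c : Char) : Int := (PySem.List.index? pvAlph c).getD 0

-- alphabet[n % 26]; n % 26 is always in range, so the default is never taken
def pvAt (n : Int) : Char := PySem.List.pyGetD pvAlph (PySem.Int.mod n 26) ' '

def samokluch_shifru (shifr : String) (kluch : String) : String :=
  let sh := shifr.toList
  -- gamma = kluch[0]; Pre_ excludes the IndexError case (kluch empty)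
  let gamma : List Char :=
    (PySem.List.pyRange 0 ((sh.length : Int) - 1) 1).foldl
      (fun g i => g ++ [pvAt (pvIdx (PySem.List.pyGetD sh i ' ') + pvIdx (PySem.List.pyGetD g i ' '))])
      [(PySem.Str.pyGet? kluch 0).getD ' ']
  let otvet : List Char :=
    (PySem.List.pyRange 0 (sh.length : Int) 1).foldl
      (fun o i => o ++ [pvAt (pvIdx (PySem.List.pyGetD sh i ' ') + pvIdx (PySem.List.pyGetD gamma i ' '))])
      []
  String.ofList otvet

-- ===== PORT B =====
def pvStep (prev : Char) (c : Char) : Char := pvAt (pvIdx c + pvIdx prev)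

def pvBLoop (prev : Char) : List Char → List Char
  | [] => []
  | c :: rest => let e := pvStep prev c; e :: pvBLoop e rest

def samokluch_shifru_alt (shifr : String) (kluch : String) : String :=
  String.ofList (pvBLoop ((PySem.Str.pyGet? kluch 0).getD ' ') shifr.toList)

-- ===== PRECONDITION & SPEC =====
-- Pre_ excludes exactly the inputs where Python A raises: empty kluch (IndexError on kluch[0]),
-- a shifr character outside A–Z, or (when shifr is nonempty) kluch[0] outside A–Z (ValueError from alphabet.index).
def Pre_samokluch_shifru (shifr : String) (kluch : String) : Prop :=
  kluch.toList ≠ [] ∧ shifr.toList.all (pvAlph.contains ·) = true ∧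
  (shifr.toList = [] ∨ pvAlph.contains (kluch.toList.headD ' ') = true)
instance (shifr : String) (kluch : String) : Decidable (Pre_samokluch_shifru shifr kluch) := by
  unfold Pre_samokluch_shifru; infer_instance

def pvWitness_samokluch_shifru : String × String := ("AB", "C")

def Spec_samokluch_shifru (shifr : String) (kluch : String) (out : String) : Prop := out = samokluch_shifru_alt shifr kluch
instance (shifr : String) (kluch : String) (out : String) : Decidable (Spec_samokluch_shifru shifr kluch out) := by unfold Spec_samokluch_shifru; infer_instance

-- ===== CLAIM (what is proved, stated in full; the proofs are below) =====
def Claim_equal_samokluch_shifru : Prop := ∀ (shifr : String) (kluch : String), Dom_samokluch_shifru shifr kluch → Pre_samokluch_shifru shifr kluch → Spec_samokluch_shifru shifr kluch (samokluch_shifru shifr kluch)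

-- ===== LEMMAS AND PROOFS =====

-- the gamma scan: pvGamma k sh = [g 0, …, g n] with g 0 = k, g (i+1) = pvStep (g i) sh[i]
def pvGamma (k : Char) : List Char → List Char
  | [] => [k]
  | c :: rest => k :: pvGamma (pvStep k c) rest

-- the last element of the gamma scan
def pvLast (k : Char) : List Char → Char
  | [] => k
  | c :: rest => pvLast (pvStep k c) rest

theorem pvBLoop_length (sh : List Char) : ∀ k, (pvBLoop k sh).length = sh.length := by
  induction sh with
  | nil => intro k; rfl
  | cons c rest ih => intro k; simp [pvBLoop, ih]

theorem pvGamma_getD_last (l : List Char) : ∀ k, (pvGamma k l).getD l.length ' ' = pvLast k l := by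
  induction l with
  | nil => intro k; rfl
  | cons c rest ih => intro k; simpa [pvGamma, pvLast] using ih (pvStep k c)

theorem pvGamma_snoc (l : List Char) : ∀ k c,
    pvGamma k (l ++ [c]) = pvGamma k l ++ [pvStep (pvLast k l) c] := by
  induction l with
  | nil => intro k c; rfl
  | cons x rest ih => intro k c; simp [pvGamma, pvLast, ih]

theorem pvGamma_take (sh : List Char) : ∀ (j : Nat) (k : Char),
    pvGamma k (sh.take j) = (pvGamma k sh).take (j + 1) := by
  induction sh with
  | nil => intro j k; simp [pvGamma]
  | cons c rest ih =>
    intro j k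
    cases j with
    | zero => simp [pvGamma]
    | succ j => simp [pvGamma, ih]

theorem pvBLoop_getD (sh : List Char) : ∀ (k : Char) (m : Nat), m < sh.length →
    (pvBLoop k sh).getD m ' ' = pvStep ((pvGamma k sh).getD m ' ') (sh.getD m ' ') := by
  induction sh with
  | nil => intro k m h; simp at h
  | cons c rest ih =>
    intro k m h
    cases m with
    | zero => simp [pvBLoop, pvGamma]
    | succ m =>
      simp only [pvBLoop, pvGamma, List.getD_cons_succ]
      exact ih (pvStep k c) m (by simpa using h)

theorem pv_take_succ_getD {α : Type} (l : List α) (m : Nat) (d : α) (h : m < l.length) :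
    l.take (m + 1) = l.take m ++ [l.getD m d] := by
  rw [List.take_add_one, List.getElem?_eq_getElem h]
  simp [List.getD, List.getElem?_eq_getElem h]

theorem pv_loop1 (sh : List Char) (k : Char) : ∀ (m : Nat), m ≤ sh.length →
    (PySem.List.pyRange 0 (m : Int) 1).foldl
      (fun g i => g ++ [pvAt (pvIdx (PySem.List.pyGetD sh i ' ') + pvIdx (PySem.List.pyGetD g i ' '))])
      [k]
    = pvGamma k (sh.take m) := by
  intro m
  induction m with
  | zero => intro _; simp [pvGamma]
  | succ m ih =>
    intro h
    have hm : m < sh.length := by omega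
    have hr : PySem.List.pyRange 0 ((m + 1 : Nat) : Int) 1
        = PySem.List.pyRange 0 (m : Int) 1 ++ [(m : Int)] := by
      have := PySem.List.pyRange_one_succ_right (a := 0) (b := (m : Int)) (by positivity)
      push_cast
      simpa using this
    rw [hr, List.foldl_append, ih (by omega)]
    simp only [List.foldl_cons, List.foldl_nil]
    rw [pv_take_succ_getD sh m ' ' hm]
    rw [pvGamma_snoc]
    congr 1
    simp only [PySem.List.pyGetD_natCast]
    have hlen : (sh.take m).length = m := by simp [Nat.min_eq_left (le_of_lt hm)]
    have hlast := pvGamma_getD_last (sh.take m) k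
    rw [hlen] at hlast
    rw [hlast]
    rfl

theorem pv_loop2 (sh : List Char) (k : Char) (g : List Char)
    (hg : ∀ m : Nat, m < sh.length → g.getD m ' ' = (pvGamma k sh).getD m ' ') :
    ∀ (m : Nat), m ≤ sh.length →
    (PySem.List.pyRange 0 (m : Int) 1).foldl
      (fun o i => o ++ [pvAt (pvIdx (PySem.List.pyGetD sh i ' ') + pvIdx (PySem.List.pyGetD g i ' '))])
      []
    = (pvBLoop k sh).take m := by
  intro m
  induction m with
  | zero => intro _; simp
  | succ m ih =>
    intro h
    have hm : m < sh.length := by omega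
    have hr : PySem.List.pyRange 0 ((m + 1 : Nat) : Int) 1
        = PySem.List.pyRange 0 (m : Int) 1 ++ [(m : Int)] := by
      have := PySem.List.pyRange_one_succ_right (a := 0) (b := (m : Int)) (by positivity)
      push_cast
      simpa using this
    rw [hr, List.foldl_append, ih (by omega)]
    simp only [List.foldl_cons, List.foldl_nil]
    rw [pv_take_succ_getD (pvBLoop k sh) m ' ' (by rw [pvBLoop_length]; exact hm)]
    congr 1
    simp only [PySem.List.pyGetD_natCast]
    rw [hg m hm, pvBLoop_getD sh k m hm]
    rfl

-- the two ports agree on every input (no precondition needed: both use the same total primitives)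
theorem pv_ports_eq (shifr kluch : String) :
    samokluch_shifru shifr kluch = samokluch_shifru_alt shifr kluch := by
  simp only [samokluch_shifru, samokluch_shifru_alt]
  generalize (PySem.Str.pyGet? kluch 0).getD ' ' = k
  generalize shifr.toList = sh
  by_cases h0 : sh = []
  · subst h0
    simp [pvBLoop, PySem.List.pyRange_one_eq_nil (le_refl (0 : Int))]
  · have hn : 1 ≤ sh.length := by
      cases sh with
      | nil => exact absurd rfl h0
      | cons a b => simp
    have h1 : ((sh.length : Int) - 1) = ((sh.length - 1 : Nat) : Int) := by omega
    rw [h1, pv_loop1 sh k (sh.length - 1) (by omega)]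
    have hgam : pvGamma k (sh.take (sh.length - 1)) = (pvGamma k sh).take (sh.length - 1 + 1) :=
      pvGamma_take sh (sh.length - 1) k
    rw [pv_loop2 sh k _ ?_ sh.length (le_refl _)]
    · rw [List.take_of_length_le (by rw [pvBLoop_length])]
    · intro m hm
      rw [hgam]
      have : m < sh.length - 1 + 1 := by omega
      simp [List.getD, this]

-- ===== VERDICT (by name: the statement is the Claim_ definition above) =====
theorem samokluch_shifru_spec : Claim_equal_samokluch_shifru := by
  intro shifr kluch _ _
  unfold Spec_samokluch_shifru
  exact pv_ports_eq shifr kluch
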